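-- pv_equiv track=rewrite | github.com/TGChenZP/MAST30034-A2_GroupWork_Py | notebooks/YangZhou/Engine.py | find_horizontal
-- ===== SOURCE A (Python) =====
-- def find_horizontal(surrounding_coordinates, core):
--     """ Find the treatment and nulls block from a 'Horizontal' vector move """
--
--     treatment = list()
--     null = list()
--     direction = list()
--
--     for i in range(len(core)):
--
--         for move in [-1, 1]:
--             treatment_target = core[i] + move
--             null_target = core[i]
--
--             treatment_tmp = list()
--             null_tmp = list()
--
--             for vector in surrounding_coordinates:
--                 if vector[i] == treatment_target:
--                     treatment_tmp.append(vector)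
--                 elif vector[i] == null_target:
--                     null_tmp.append(vector)
--
--             treatment.append(treatment_tmp)
--             null.append(null_tmp)
--             direction.append([move if j == i else 0 for j in range(len(core))])
--
--     return treatment, null, direction
-- ===== SOURCE B (Python) =====
-- def find_horizontal(surrounding_coordinates, core):
--     """Index-then-lookup: group vectors by their i-th coordinate once per axis,
--     then answer each move by a dict lookup (fresh list copies per slot)."""
--     treatment, null, direction = [], [], []
--     n = len(core)
--     for i in range(n):
--         groups = {}
--         for vector in surrounding_coordinates:
--             groups.setdefault(vector[i], []).append(vector)
--         for move in (-1, 1):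
--             treatment.append(list(groups.get(core[i] + move, [])))
--             null.append(list(groups.get(core[i], [])))
--             direction.append([move if j == i else 0 for j in range(n)])
--     return treatment, null, direction
-- ===== Notes on version B (the rewrite author's own statement) =====
-- stated objective: alternative
-- what changed: Replaces A's two per-move scans of surrounding_coordinates for each axis with one grouping pass per axis building a dict keyed by vector[i], then answers each move's treatment/null blocks by dict lookups.
import Mathlib
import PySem

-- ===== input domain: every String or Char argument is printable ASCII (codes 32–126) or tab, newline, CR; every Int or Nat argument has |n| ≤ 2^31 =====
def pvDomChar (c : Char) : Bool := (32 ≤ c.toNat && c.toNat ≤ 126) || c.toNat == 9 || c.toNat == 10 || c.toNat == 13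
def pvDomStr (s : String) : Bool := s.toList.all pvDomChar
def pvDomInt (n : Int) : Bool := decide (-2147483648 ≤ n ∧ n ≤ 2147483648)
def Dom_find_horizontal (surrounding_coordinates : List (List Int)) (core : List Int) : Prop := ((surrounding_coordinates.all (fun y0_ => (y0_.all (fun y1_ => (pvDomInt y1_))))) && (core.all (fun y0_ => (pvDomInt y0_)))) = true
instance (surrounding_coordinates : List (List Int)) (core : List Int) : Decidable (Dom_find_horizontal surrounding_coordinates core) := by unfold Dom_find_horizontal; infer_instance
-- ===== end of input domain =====

-- B replaces A's two scans of surrounding_coordinates per move with one grouping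
-- dict per axis followed by lookups (objective: alternative decomposition, same cost).

-- ===== PORT A =====
-- Literal port of A. `core[i]` with i ∈ range(len(core)) is always in range, ported as getD;
-- `vector[i]` can raise IndexError for short vectors — those inputs are excluded by Pre_ below,
-- and on Pre_ getD is exact.
def find_horizontal (surrounding_coordinates : List (List Int)) (core : List Int) : List (List (List Int)) × List (List (List Int)) × List (List Int) :=
  (List.range core.length).foldl (fun acc i =>
    ([(-1 : Int), 1]).foldl (fun acc move =>
      let treatment_target := core.getD i 0 + move
      let null_target := core.getD i 0
      let tmp := surrounding_coordinates.foldl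
        (fun (p : List (List Int) × List (List Int)) vector =>
          if vector.getD i 0 == treatment_target then (p.1 ++ [vector], p.2)
          else if vector.getD i 0 == null_target then (p.1, p.2 ++ [vector])
          else p) ([], [])
      (acc.1 ++ [tmp.1], acc.2.1 ++ [tmp.2],
        acc.2.2 ++ [(List.range core.length).map (fun j => if j == i then move else (0 : Int))]))
      acc) ([], [], [])

-- ===== PORT B =====
-- Literal port of Source B: per axis i, one grouping pass building a dict keyed by vector[i]
-- (setdefault+append = Dict.modify with [] and append), then per move two dict lookups.
def find_horizontal_alt (surrounding_coordinates : List (List Int)) (core : List Int) : List (List (List Int)) × List (List (List Int)) × List (List Int) :=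
  (List.range core.length).foldl (fun acc i =>
    let groups : PySem.Dict Int (List (List Int)) :=
      surrounding_coordinates.foldl
        (fun d vector => d.modify (vector.getD i 0) [] (· ++ [vector])) PySem.Dict.empty
    ([(-1 : Int), 1]).foldl (fun acc move =>
      (acc.1 ++ [groups.getD (core.getD i 0 + move) []],
       acc.2.1 ++ [groups.getD (core.getD i 0) []],
       acc.2.2 ++ [(List.range core.length).map (fun j => if j == i then move else (0 : Int))]))
      acc) ([], [], [])

-- ===== PRECONDITION & SPEC =====
-- Pre_ excludes exactly the inputs where Python A raises IndexError: some vector in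
-- surrounding_coordinates shorter than core (vector[i] out of range for some i < len(core)).
def Pre_find_horizontal (surrounding_coordinates : List (List Int)) (core : List Int) : Prop :=
  ∀ v ∈ surrounding_coordinates, core.length ≤ v.length
instance (surrounding_coordinates : List (List Int)) (core : List Int) : Decidable (Pre_find_horizontal surrounding_coordinates core) := by unfold Pre_find_horizontal; infer_instance

def pvWitness_find_horizontal : List (List Int) × List Int := ([[0, 1], [1, 0], [1, 1]], [0, 1])

def Spec_find_horizontal (surrounding_coordinates : List (List Int)) (core : List Int) (out : List (List (List Int)) × List (List (List Int)) × List (List Int)) : Prop := out = find_horizontal_alt surrounding_coordinates core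
instance (surrounding_coordinates : List (List Int)) (core : List Int) (out : List (List (List Int)) × List (List (List Int)) × List (List Int)) : Decidable (Spec_find_horizontal surrounding_coordinates core out) := by unfold Spec_find_horizontal; infer_instance

-- ===== CLAIM (what is proved, stated in full; the proofs are below) =====
def Claim_equal_find_horizontal : Prop := ∀ (surrounding_coordinates : List (List Int)) (core : List Int), Dom_find_horizontal surrounding_coordinates core → Pre_find_horizontal surrounding_coordinates core → Spec_find_horizontal surrounding_coordinates core (find_horizontal surrounding_coordinates core)

-- ===== LEMMAS AND PROOFS =====

-- A's inner scan splits the list into the two filters (treatment first-match wins, but the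
-- two targets are distinct so the branches are disjoint filters).
theorem fh_scanA (i : Nat) (tt nt : Int) (h : tt ≠ nt) :
    ∀ (sc : List (List Int)) (p : List (List Int) × List (List Int)),
      sc.foldl (fun (p : List (List Int) × List (List Int)) vector =>
          if vector.getD i 0 == tt then (p.1 ++ [vector], p.2)
          else if vector.getD i 0 == nt then (p.1, p.2 ++ [vector])
          else p) p
      = (p.1 ++ sc.filter (fun v => v.getD i 0 == tt),
         p.2 ++ sc.filter (fun v => v.getD i 0 == nt)) := by
  intro sc
  induction sc with
  | nil => intro p; simp
  | cons v tl ih =>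
    intro p
    simp only [List.foldl_cons, List.filter_cons, ih]
    by_cases hvt : v.getD i 0 = tt
    · have hvn : ¬ v.getD i 0 = nt := by rw [hvt]; exact h
      simp_all
    · by_cases hvn : v.getD i 0 = nt
      · simp_all
      · simp_all

-- B's grouping loop: looking up k in the dict built by the grouping pass yields the filter.
theorem fh_groupB (i : Nat) :
    ∀ (sc : List (List Int)) (d : PySem.Dict Int (List (List Int))) (k : Int),
      (sc.foldl (fun d vector => d.modify (vector.getD i 0) [] (· ++ [vector])) d).getD k []
      = d.getD k [] ++ sc.filter (fun v => v.getD i 0 == k) := by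
  intro sc
  induction sc with
  | nil => intro d k; simp
  | cons v tl ih =>
    intro d k
    simp only [List.foldl_cons, List.filter_cons, ih, PySem.Dict.getD_modify]
    by_cases hk : v.getD i 0 = k
    · simp_all
    · have hk' : ¬ (k = v.getD i 0) := fun e => hk e.symm
      simp_all

-- The two ports agree on every input (both total as Lean functions).
theorem fh_eq (sc : List (List Int)) (core : List Int) :
    find_horizontal sc core = find_horizontal_alt sc core := by
  unfold find_horizontal find_horizontal_alt
  apply PySem.List.foldl_congr_mem
  intro acc i _
  have h1 : core.getD i 0 + -1 ≠ core.getD i 0 := by omega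
  have h2 : core.getD i 0 + 1 ≠ core.getD i 0 := by omega
  simp only [List.foldl_cons, List.foldl_nil]
  rw [fh_scanA i _ _ h1, fh_scanA i _ _ h2, fh_groupB, fh_groupB, fh_groupB]
  simp

-- ===== VERDICT (by name: the statement is the Claim_ definition above) =====
theorem find_horizontal_spec : Claim_equal_find_horizontal := by
  intro sc core _ _
  unfold Spec_find_horizontal
  exact fh_eq sc core
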